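-- pv_equiv track=rewrite | github.com/Yassellee/Tsingenda-backend | src/utils/ner_extractor.py | get_continuous_list
-- ===== SOURCE A (Python) =====
-- from typing import Tuple, Union, List
--
-- def get_continuous_list(entity_list: List[Tuple[Union[str, int]]]):
--     if not entity_list:
--         return []
--
--     res_list = []
--     p_word, _, _, p_ed = entity_list[0]
--     for idx in range(1, len(entity_list)):
--         c_word, _, c_st, c_ed = entity_list[idx]
--         if c_st == p_ed:
--             p_word += c_word
--         else:
--             res_list.append(p_word)
--             p_word = c_word
--
--         p_ed = c_ed
--
--     res_list.append(p_word)
--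
--     return res_list
-- ===== SOURCE B (Python) =====
-- def get_continuous_list(entity_list):
--     # Phase 1: split into runs of contiguous entities (next start == previous end).
--     groups = []
--     cur = []
--     prev_end = None
--     for word, _, st, ed in entity_list:
--         if cur and st == prev_end:
--             cur.append(word)
--         else:
--             if cur:
--                 groups.append(cur)
--             cur = [word]
--         prev_end = ed
--     if cur:
--         groups.append(cur)
--     # Phase 2: combine each run's words with '+' folding.
--     res = []
--     for g in groups:
--         acc = g[0]
--         for w in g[1:]:
--             acc += w
--         res.append(acc)
--     return res
-- ===== Notes on version B (the rewrite author's own statement) =====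
-- stated objective: alternative
-- what changed: A merges words on the fly in one loop with a pending-word accumulator; B first splits the list into contiguous runs, then maps a '+'-fold over each run.
import Mathlib
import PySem

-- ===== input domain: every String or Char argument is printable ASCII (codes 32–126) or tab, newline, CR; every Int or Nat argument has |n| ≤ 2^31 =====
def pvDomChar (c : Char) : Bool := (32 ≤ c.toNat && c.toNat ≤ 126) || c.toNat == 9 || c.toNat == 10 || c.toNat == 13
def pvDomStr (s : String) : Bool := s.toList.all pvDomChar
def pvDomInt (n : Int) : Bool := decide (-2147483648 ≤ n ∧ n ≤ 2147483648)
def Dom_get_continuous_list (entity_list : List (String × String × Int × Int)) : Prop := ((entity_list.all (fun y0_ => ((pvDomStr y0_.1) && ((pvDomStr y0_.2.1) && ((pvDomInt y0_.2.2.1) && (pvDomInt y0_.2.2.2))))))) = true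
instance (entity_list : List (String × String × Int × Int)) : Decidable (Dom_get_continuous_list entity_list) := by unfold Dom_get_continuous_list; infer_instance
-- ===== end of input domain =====

-- B replaces A's on-the-fly pending-word merge with a split-into-runs phase followed by a '+'-fold over each run (alternative decomposition, same cost).


-- ===== PORT A =====
-- A's loop over entity_list[1:] carrying (res_list, p_word, p_ed)
def gclAStep (s : List String × String × Int) (c : String × String × Int × Int) :
    List String × String × Int :=
  let (res_list, p_word, p_ed) := s
  let (c_word, _, c_st, c_ed) := c
  if c_st = p_ed then (res_list, p_word ++ c_word, c_ed)
  else (res_list ++ [p_word], c_word, c_ed)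

def get_continuous_list (entity_list : List (String × String × Int × Int)) : List String :=
  match entity_list with
  | [] => []
  | (p_word, _, _, p_ed) :: rest =>
    let st := rest.foldl gclAStep ([], p_word, p_ed)
    st.1 ++ [st.2.1]

-- ===== PORT B =====
-- phase 1: split into contiguous runs, carrying (groups, cur, prev_end)
def gclBStep (s : List (List String) × List String × Option Int) (c : String × String × Int × Int) :
    List (List String) × List String × Option Int :=
  let (groups, cur, prev_end) := s
  let (word, _, st, ed) := c
  if cur ≠ [] ∧ prev_end = some st then (groups, cur ++ [word], some ed)
  else ((if cur = [] then groups else groups ++ [cur]), [word], some ed)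

-- phase 2: combine a run's words by '+'-folding from its head
def gclCombine (g : List String) : String :=
  match g with
  | [] => ""
  | acc :: ws => ws.foldl (· ++ ·) acc

def get_continuous_list_alt (entity_list : List (String × String × Int × Int)) : List String :=
  let st := entity_list.foldl gclBStep ([], [], none)
  let groups := if st.2.1 = [] then st.1 else st.1 ++ [st.2.1]
  groups.map gclCombine

-- ===== PRECONDITION & SPEC =====
def Spec_get_continuous_list (entity_list : List (String × String × Int × Int)) (out : List String) : Prop := out = get_continuous_list_alt entity_list
instance (entity_list : List (String × String × Int × Int)) (out : List String) : Decidable (Spec_get_continuous_list entity_list out) := by unfold Spec_get_continuous_list; infer_instance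

-- ===== CLAIM (what is proved, stated in full; the proofs are below) =====
def Claim_equal_get_continuous_list : Prop := ∀ (entity_list : List (String × String × Int × Int)), Dom_get_continuous_list entity_list → Spec_get_continuous_list entity_list (get_continuous_list entity_list)

-- ===== LEMMAS AND PROOFS =====
theorem gclCombine_append (g : List String) (w : String) (h : g ≠ []) :
    gclCombine (g ++ [w]) = gclCombine g ++ w := by
  cases g with
  | nil => exact absurd rfl h
  | cons a t => simp [gclCombine, List.foldl_append]

theorem gclKey (rest : List (String × String × Int × Int))
    (res : List String) (pw : String) (pe : Int)
    (gs : List (List String)) (cur : List String)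
    (hcur : cur ≠ []) (hcomb : gclCombine cur = pw) (hres : gs.map gclCombine = res) :
    (let st := rest.foldl gclAStep (res, pw, pe)
     st.1 ++ [st.2.1]) =
    (let st := rest.foldl gclBStep (gs, cur, some pe)
     (if st.2.1 = [] then st.1 else st.1 ++ [st.2.1]).map gclCombine) := by
  induction rest generalizing res pw pe gs cur with
  | nil =>
    simp [hcur, ← hres, ← hcomb]
  | cons c t ih =>
    obtain ⟨w, x, st, ed⟩ := c
    by_cases h : st = pe
    · have hb : (cur ≠ [] ∧ some pe = some st) := ⟨hcur, by rw [h]⟩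
      simp only [List.foldl_cons, gclAStep, gclBStep, if_pos h, if_pos hb]
      exact ih res (pw ++ w) ed gs (cur ++ [w]) (by simp)
        (by rw [gclCombine_append cur w hcur, hcomb]) hres
    · have hb : ¬ (cur ≠ [] ∧ some pe = some st) := by
        rintro ⟨-, he⟩; exact h (Option.some.inj he).symm
      simp only [List.foldl_cons, gclAStep, gclBStep, if_neg h, if_neg hb, if_neg hcur]
      exact ih (res ++ [pw]) w ed (gs ++ [cur]) [w] (by simp)
        rfl (by simp [hres, hcomb])

-- ===== VERDICT (by name: the statement is the Claim_ definition above) =====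
theorem get_continuous_list_spec : Claim_equal_get_continuous_list := by
  intro entity_list _
  unfold Spec_get_continuous_list
  cases entity_list with
  | nil => rfl
  | cons e rest =>
    obtain ⟨w, x, st, ed⟩ := e
    have := gclKey rest [] w ed [] [w] (by simp) rfl rfl
    simpa [get_continuous_list, get_continuous_list_alt, gclBStep] using this
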